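-- pv_equiv track=rewrite | github.com/pradykst/AoC_solution | Day7_2.py | count_timeline
-- ===== SOURCE A (Python) =====
-- from collections import defaultdict
--
-- def count_timeline(grid):
--     rows=len(grid)
--     cols=len(grid[0]) if rows else 0
--
--     sr=sc=None
--
--     for r in range(rows):
--         for c in range(cols):
--             if grid[r][c]=="S":
--                 sr,sc=r,c
--                 break
--         if sr is not None:
--             break
--
--     if sr is None:
--         raise ValueError("No s in grid")
--
--
--
--
--     ways={sc:1}
--
--     for r in range(sr+1,rows):
--         next_ways=defaultdict(int)
--
--         for c,w in ways.items():
--             if not (0<=c<cols):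
--                 continue
--
--             cell=grid[r][c]
--
--
--             if cell=="^":
--                 if c-1>=0:
--                     next_ways[c-1]+=w
--                 if c+1<cols:
--                     next_ways[c+1]+=w
--
--             else:
--                 next_ways[c]+=w
--
--         ways=next_ways
--
--     return sum(ways.values())
-- ===== SOURCE B (Python) =====
-- def count_timeline(grid):
--     rows = len(grid)
--     cols = len(grid[0]) if rows else 0
--
--     sr = sc = None
--     for r, row in enumerate(grid):
--         for c in range(cols):
--             if row[c] == "S":
--                 sr, sc = r, c
--                 break
--         if sr is not None:
--             break
--
--     if sr is None:
--         raise ValueError("No s in grid")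
--
--     # dense forward DP, pull-style: cnt[c] = paths entering the current row at column c
--     cnt = [0] * cols
--     cnt[sc] = 1
--     for row in grid[sr + 1:]:
--         cnt = [(cnt[c - 1] if c - 1 >= 0 and row[c - 1] == "^" else 0)
--                + (cnt[c + 1] if c + 1 < cols and row[c + 1] == "^" else 0)
--                + (cnt[c] if row[c] != "^" else 0)
--                for c in range(cols)]
--     return sum(cnt)
-- ===== Notes on version B (the rewrite author's own statement) =====
-- stated objective: alternative
-- what changed: A propagates path weights forward row by row through a sparse defaultdict, pushing each surviving column's weight to its successor columns; B replaces the dict entirely with a dense list of per-column counts and a pull-style list comprehension that recomputes each column from its up-to-three predecessor columns, summing the list at the end.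
-- outside the precondition, e.g. on count_timeline([['S', 'a'], ['x']]): A returns 1, B raises IndexError
import Mathlib
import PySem

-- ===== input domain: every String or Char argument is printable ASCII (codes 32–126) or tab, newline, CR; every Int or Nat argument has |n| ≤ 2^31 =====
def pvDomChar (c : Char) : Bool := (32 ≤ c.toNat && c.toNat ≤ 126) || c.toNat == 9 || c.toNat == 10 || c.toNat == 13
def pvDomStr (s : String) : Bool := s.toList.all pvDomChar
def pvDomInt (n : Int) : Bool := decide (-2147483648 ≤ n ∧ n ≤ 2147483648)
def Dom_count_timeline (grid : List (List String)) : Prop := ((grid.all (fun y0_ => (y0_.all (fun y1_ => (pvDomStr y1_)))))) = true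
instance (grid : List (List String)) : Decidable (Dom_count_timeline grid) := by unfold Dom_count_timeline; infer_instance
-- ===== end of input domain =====

-- B replaces A's sparse forward dict ("push" into a defaultdict) propagation by a dense
-- per-column "pull" recurrence over plain lists (objective: alternative decomposition).

-- ===== PORT A =====
-- Both Pythons locate "S" with the same double loop (break on first hit); ported once.
-- grid[r][c] is read via getD "" — exact wherever Python does not raise (ragged grids are outside Pre_).
def pvFindS : List (List String) → Nat → Nat → Option (Nat × Nat)
  | [], _, _ => none
  | row :: rest, cols, r =>
    match (List.range cols).find? (fun c => row.getD c "" == "S") with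
    | some c => some (r, c)
    | none => pvFindS rest cols (r + 1)

-- one row of A's propagation: fold over ways.items(), pushing into next_ways (defaultdict +=)
def pvStepA (row : List String) (cols : Nat) (ways : PySem.Dict Int Int) : PySem.Dict Int Int :=
  ways.items.foldl
    (fun nw cw =>
      let c := cw.1
      let w := cw.2
      if 0 ≤ c ∧ c < (cols : Int) then
        if row.getD c.toNat "" == "^" then
          let nw1 := if 0 ≤ c - 1 then nw.insert (c - 1) (nw.getD (c - 1) 0 + w) else nw
          if c + 1 < (cols : Int) then nw1.insert (c + 1) (nw1.getD (c + 1) 0 + w) else nw1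
        else nw.insert c (nw.getD c 0 + w)
      else nw)
    PySem.Dict.empty

def count_timeline (grid : List (List String)) : Int :=
  let cols := (grid.headD []).length
  match pvFindS grid cols 0 with
  | none => 0      -- Python raises ValueError("No s in grid") here; excluded by Pre_
  | some sv =>
    -- for r in range(sr+1, rows): ways = step(grid[r], ways)   — a fold over grid.drop (sr+1)
    let ways := (grid.drop (sv.1 + 1)).foldl (fun w row => pvStepA row cols w)
                  (PySem.Dict.empty.insert (sv.2 : Int) 1)
    ways.values.sum

-- ===== PORT B =====
-- one row of B's propagation: dense pull comprehension over range(cols)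
def pvStepB (row : List String) (cols : Nat) (cnt : List Int) : List Int :=
  (List.range cols).map (fun c =>
    (if 0 < c ∧ row.getD (c - 1) "" == "^" then cnt.getD (c - 1) 0 else 0)
    + (if c + 1 < cols ∧ row.getD (c + 1) "" == "^" then cnt.getD (c + 1) 0 else 0)
    + (if !(row.getD c "" == "^") then cnt.getD c 0 else 0))

def count_timeline_alt (grid : List (List String)) : Int :=
  let cols := (grid.headD []).length
  match pvFindS grid cols 0 with
  | none => 0      -- Python raises ValueError("No s in grid") here; excluded by Pre_
  | some sv =>
    -- cnt = [0]*cols; cnt[sc] = 1; for row in grid[sr+1:]: cnt = pull(row, cnt)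
    let cnt := (grid.drop (sv.1 + 1)).foldl (fun cnt row => pvStepB row cols cnt)
                 ((List.replicate cols (0 : Int)).set sv.2 1)
    cnt.sum

-- ===== PRECONDITION & SPEC =====
-- Pre_ excludes (a) grids where A raises: the empty grid and grids without an "S" in the
-- first len(grid[0]) columns (ValueError), and (b) ragged grids with a row shorter than
-- grid[0] — there an IndexError in A depends on which cells the propagation happens to
-- reach, so A may return while B (which reads every column of each row) raises.
def Pre_count_timeline (grid : List (List String)) : Prop :=
  grid ≠ [] ∧
  (∀ row ∈ grid, (grid.headD []).length ≤ row.length) ∧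
  (∃ row ∈ grid, "S" ∈ row.take (grid.headD []).length)
instance (grid : List (List String)) : Decidable (Pre_count_timeline grid) := by
  unfold Pre_count_timeline; infer_instance

def pvWitness_count_timeline : List (List String) :=
  [[".", "S", "."], [".", "^", "."], ["^", ".", "^"]]

def Spec_count_timeline (grid : List (List String)) (out : Int) : Prop := out = count_timeline_alt grid
instance (grid : List (List String)) (out : Int) : Decidable (Spec_count_timeline grid out) := by unfold Spec_count_timeline; infer_instance

-- ===== CLAIM (what is proved, stated in full; the proofs are below) =====
def Claim_equal_count_timeline : Prop := ∀ (grid : List (List String)), Dom_count_timeline grid → Pre_count_timeline grid → Spec_count_timeline grid (count_timeline grid)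

-- ===== LEMMAS AND PROOFS =====

-- relation between A's sparse dict state and B's dense list state
def pvRel (cols : Nat) (d : PySem.Dict Int Int) (l : List Int) : Prop :=
  l.length = cols ∧ d.keys.Nodup ∧ (∀ k ∈ d.keys, 0 ≤ k ∧ k < (cols : Int)) ∧
  (∀ c : Nat, c < cols → d.getD (c : Int) 0 = l.getD c 0)

-- push contribution of one item (c, w) of ways to column t of next_ways
def pvContrib (row : List String) (cols : Nat) (c w t : Int) : Int :=
  if 0 ≤ c ∧ c < (cols : Int) then
    if row.getD c.toNat "" == "^" then
      (if (0 ≤ c - 1 ∧ t = c - 1) then w else 0) + (if (c + 1 < (cols : Int) ∧ t = c + 1) then w else 0)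
    else (if t = c then w else 0)
  else 0

theorem pvContrib_zero (row : List String) (cols : Nat) (c t : Int) :
    pvContrib row cols c 0 t = 0 := by
  unfold pvContrib; split_ifs <;> simp

theorem pvContrib_support (row : List String) (cols : Nat) (c w t : Int)
    (h1 : c ≠ t - 1) (h2 : c ≠ t) (h3 : c ≠ t + 1) : pvContrib row cols c w t = 0 := by
  unfold pvContrib; split_ifs <;> first | rfl | omega

theorem pvPush_getD (row : List String) (cols : Nat) (nw : PySem.Dict Int Int) (c w t : Int) :
    ((if 0 ≤ c ∧ c < (cols : Int) then
        if row.getD c.toNat "" == "^" then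
          let nw1 := if 0 ≤ c - 1 then nw.insert (c - 1) (nw.getD (c - 1) 0 + w) else nw
          if c + 1 < (cols : Int) then nw1.insert (c + 1) (nw1.getD (c + 1) 0 + w) else nw1
        else nw.insert c (nw.getD c 0 + w)
      else nw).getD t 0) = nw.getD t 0 + pvContrib row cols c w t := by
  unfold pvContrib
  by_cases h1 : 0 ≤ c ∧ c < (cols : Int)
  · rw [if_pos h1, if_pos h1]
    by_cases h2 : (row.getD c.toNat "" == "^") = true
    · rw [if_pos h2, if_pos h2]
      by_cases h3 : 0 ≤ c - 1 <;> by_cases h4 : c + 1 < (cols : Int) <;>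
        simp only [h3, h4, PySem.Dict.getD_insert, if_pos, if_neg,
          not_false_iff, true_and, false_and] <;>
        (try split_ifs) <;> (try simp_all) <;> omega
    · rw [if_neg h2, if_neg h2, PySem.Dict.getD_insert]
      (try split_ifs) <;> (try simp_all) <;> omega
  · rw [if_neg h1, if_neg h1]
    simp

theorem pvFoldPush_getD (row : List String) (cols : Nat) (ps : List (Int × Int))
    (nw : PySem.Dict Int Int) (t : Int) :
    (ps.foldl
      (fun nw cw =>
        let c := cw.1
        let w := cw.2
        if 0 ≤ c ∧ c < (cols : Int) then
          if row.getD c.toNat "" == "^" then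
            let nw1 := if 0 ≤ c - 1 then nw.insert (c - 1) (nw.getD (c - 1) 0 + w) else nw
            if c + 1 < (cols : Int) then nw1.insert (c + 1) (nw1.getD (c + 1) 0 + w) else nw1
          else nw.insert c (nw.getD c 0 + w)
        else nw) nw).getD t 0
      = nw.getD t 0 + (ps.map (fun p => pvContrib row cols p.1 p.2 t)).sum := by
  induction ps generalizing nw with
  | nil => simp
  | cons p rest ih =>
    rw [List.foldl_cons, List.map_cons, List.sum_cons, ih]
    have := pvPush_getD row cols nw p.1 p.2 t
    simp only at this ⊢
    rw [this]
    ring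

theorem pvStepA_getD (row : List String) (cols : Nat) (d : PySem.Dict Int Int) (t : Int) :
    (pvStepA row cols d).getD t 0
      = (d.items.map (fun p => pvContrib row cols p.1 p.2 t)).sum := by
  unfold pvStepA
  rw [pvFoldPush_getD]
  simp

theorem pvPush_keys (row : List String) (cols : Nat) (nw : PySem.Dict Int Int) (c w : Int)
    (hnd : nw.keys.Nodup) (hb : ∀ k ∈ nw.keys, 0 ≤ k ∧ k < (cols : Int)) :
    ((if 0 ≤ c ∧ c < (cols : Int) then
        if row.getD c.toNat "" == "^" then
          let nw1 := if 0 ≤ c - 1 then nw.insert (c - 1) (nw.getD (c - 1) 0 + w) else nw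
          if c + 1 < (cols : Int) then nw1.insert (c + 1) (nw1.getD (c + 1) 0 + w) else nw1
        else nw.insert c (nw.getD c 0 + w)
      else nw).keys.Nodup ∧
    (∀ k ∈ (if 0 ≤ c ∧ c < (cols : Int) then
        if row.getD c.toNat "" == "^" then
          let nw1 := if 0 ≤ c - 1 then nw.insert (c - 1) (nw.getD (c - 1) 0 + w) else nw
          if c + 1 < (cols : Int) then nw1.insert (c + 1) (nw1.getD (c + 1) 0 + w) else nw1
        else nw.insert c (nw.getD c 0 + w)
      else nw).keys, 0 ≤ k ∧ k < (cols : Int))) := by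
  split_ifs with h1 h2 h3 h4 h4 <;>
    refine ⟨by (repeat first | exact hnd | apply PySem.Dict.nodup_keys_insert), ?_⟩ <;>
    intro k hk <;>
    (try simp only [PySem.Dict.mem_keys_insert] at hk) <;>
    first
      | exact hb k hk
      | (rcases hk with hk | hk | hk <;> first | omega | exact hb k hk)
      | (rcases hk with hk | hk <;> first | omega | exact hb k hk)

theorem pvStepA_keys (row : List String) (cols : Nat) (d : PySem.Dict Int Int) :
    (pvStepA row cols d).keys.Nodup ∧
    (∀ k ∈ (pvStepA row cols d).keys, 0 ≤ k ∧ k < (cols : Int)) := by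
  unfold pvStepA
  have H : ∀ (ps : List (Int × Int)) (nw : PySem.Dict Int Int),
      nw.keys.Nodup → (∀ k ∈ nw.keys, 0 ≤ k ∧ k < (cols : Int)) →
      (ps.foldl
        (fun nw cw =>
          let c := cw.1
          let w := cw.2
          if 0 ≤ c ∧ c < (cols : Int) then
            if row.getD c.toNat "" == "^" then
              let nw1 := if 0 ≤ c - 1 then nw.insert (c - 1) (nw.getD (c - 1) 0 + w) else nw
              if c + 1 < (cols : Int) then nw1.insert (c + 1) (nw1.getD (c + 1) 0 + w) else nw1
            else nw.insert c (nw.getD c 0 + w)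
          else nw) nw).keys.Nodup ∧
      (∀ k ∈ (ps.foldl
        (fun nw cw =>
          let c := cw.1
          let w := cw.2
          if 0 ≤ c ∧ c < (cols : Int) then
            if row.getD c.toNat "" == "^" then
              let nw1 := if 0 ≤ c - 1 then nw.insert (c - 1) (nw.getD (c - 1) 0 + w) else nw
              if c + 1 < (cols : Int) then nw1.insert (c + 1) (nw1.getD (c + 1) 0 + w) else nw1
            else nw.insert c (nw.getD c 0 + w)
          else nw) nw).keys, 0 ≤ k ∧ k < (cols : Int)) := by
    intro ps
    induction ps with
    | nil => intro nw h1 h2; exact ⟨h1, h2⟩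
    | cons p rest ih =>
      intro nw h1 h2
      rw [List.foldl_cons]
      have hp := pvPush_keys row cols nw p.1 p.2 h1 h2
      simp only at hp ⊢
      exact ih _ hp.1 hp.2
  exact H d.items PySem.Dict.empty (by simp) (by simp)

-- a sum over the items of a dict with Nodup keys, of a function supported on {t-1, t, t+1}
theorem pvDictSumThree (d : PySem.Dict Int Int) (hnd : d.keys.Nodup) (t : Int)
    (F : Int → Int → Int) (hz : ∀ c, F c 0 = 0)
    (hs : ∀ c w, c ≠ t - 1 → c ≠ t → c ≠ t + 1 → F c w = 0) :
    (d.items.map (fun p => F p.1 p.2)).sum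
      = F (t - 1) (d.getD (t - 1) 0) + F t (d.getD t 0) + F (t + 1) (d.getD (t + 1) 0) := by
  have g0 : ∀ k : Int, k ∉ d.keys → F k (d.getD k 0) = 0 := by
    intro k hk
    rw [PySem.Dict.getD_of_not_contains _ _ (by
      rcases h : d.contains k with _ | _
      · rfl
      · exact absurd ((PySem.Dict.contains_iff_mem_keys d k).mp h) hk)]
    exact hz k
  rw [PySem.Dict.items_eq_map_keys d hnd 0, List.map_map]
  have h1 : ((fun p : Int × Int => F p.1 p.2) ∘ fun k => (k, d.getD k 0)) = fun k => F k (d.getD k 0) := rfl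
  rw [h1, ← List.sum_toFinset _ hnd]
  have hsub1 : d.keys.toFinset ∩ ({t - 1, t, t + 1} : Finset Int) ⊆ d.keys.toFinset :=
    Finset.inter_subset_left
  rw [← Finset.sum_subset hsub1 (by
    intro x hx hnx
    apply hs
    all_goals
      intro he
      exact hnx (Finset.mem_inter.mpr ⟨hx, by simp [he]⟩))]
  have hsub2 : d.keys.toFinset ∩ ({t - 1, t, t + 1} : Finset Int) ⊆ ({t - 1, t, t + 1} : Finset Int) :=
    Finset.inter_subset_right
  rw [Finset.sum_subset hsub2 (by
    intro x hx hnx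
    apply g0
    intro hmem
    exact hnx (Finset.mem_inter.mpr ⟨List.mem_toFinset.mpr hmem, hx⟩))]
  rw [show ({t - 1, t, t + 1} : Finset Int) = insert (t - 1) (insert t {t + 1}) from rfl,
    Finset.sum_insert (by simp; omega), Finset.sum_insert (by simp), Finset.sum_singleton]
  ring

theorem pvValuesSum (cols : Nat) (d : PySem.Dict Int Int) (l : List Int)
    (h : pvRel cols d l) : d.values.sum = l.sum := by
  obtain ⟨hlen, hnd, hb, hg⟩ := h
  rw [PySem.Dict.values_eq_map_keys d hnd 0, ← List.sum_toFinset _ hnd]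
  have hsub : d.keys.toFinset ⊆ (Finset.range cols).image (fun n : Nat => (n : Int)) := by
    intro k hk
    have hk' := hb k (List.mem_toFinset.mp hk)
    exact Finset.mem_image.mpr ⟨k.toNat, Finset.mem_range.mpr (by omega), by omega⟩
  rw [Finset.sum_subset hsub (by
    intro x hx hnx
    rw [PySem.Dict.getD_of_not_contains _ _ (by
      rcases hc : d.contains x with _ | _
      · rfl
      · exact absurd (List.mem_toFinset.mpr ((PySem.Dict.contains_iff_mem_keys d x).mp hc)) hnx)])]
  rw [Finset.sum_image (by intro a _ b _ hab; simpa using hab)]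
  have : ∀ c ∈ Finset.range cols, d.getD (c : Int) 0 = l.getD c 0 := by
    intro c hc
    exact hg c (Finset.mem_range.mp hc)
  rw [Finset.sum_congr rfl this]
  have hl : l = (List.range l.length).map (fun c => l.getD c 0) := by
    apply List.ext_getElem
    · simp
    · intro i h1 h2
      simp [List.getD_eq_getElem?_getD, h1]
  conv_rhs => rw [hl]
  rw [hlen]
  rfl

theorem pvE1 (row : List String) (cols t : Nat) (ht : t < cols) (W V : Int)
    (h0 : t = 0 → W = 0) (h1 : 0 < t → W = V) :
    pvContrib row cols ((t : Int) - 1) W (t : Int)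
      = if 0 < t ∧ row.getD (t - 1) "" == "^" then V else 0 := by
  unfold pvContrib
  by_cases ht0 : 0 < t
  · rw [h1 ht0, show ((t : Int) - 1) = ((t - 1 : Nat) : Int) by omega,
      if_pos (⟨by omega, by push_cast; omega⟩ : 0 ≤ ((t - 1 : Nat) : Int) ∧ ((t - 1 : Nat) : Int) < (cols : Int))]
    simp only [Int.toNat_natCast]
    by_cases hc : (row.getD (t - 1) "" == "^") = true <;>
      simp [hc, ht0] <;> (try split_ifs) <;> omega
  · rw [h0 (by omega), if_neg (by omega), if_neg (fun hh => ht0 hh.1)]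

theorem pvE2 (row : List String) (cols t : Nat) (ht : t < cols) (V : Int) :
    pvContrib row cols (t : Int) V (t : Int)
      = if !(row.getD t "" == "^") then V else 0 := by
  unfold pvContrib
  rw [if_pos (⟨by omega, by exact_mod_cast ht⟩ : 0 ≤ (t : Int) ∧ (t : Int) < (cols : Int))]
  simp only [Int.toNat_natCast]
  cases hc : (row.getD t "" == "^") <;> simp <;> (try split_ifs) <;> omega

theorem pvE3 (row : List String) (cols t : Nat) (ht : t < cols) (W V : Int)
    (h0 : ¬ t + 1 < cols → W = 0) (h1 : t + 1 < cols → W = V) :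
    pvContrib row cols ((t : Int) + 1) W (t : Int)
      = if t + 1 < cols ∧ row.getD (t + 1) "" == "^" then V else 0 := by
  unfold pvContrib
  by_cases ht1 : t + 1 < cols
  · rw [h1 ht1, show ((t : Int) + 1) = ((t + 1 : Nat) : Int) by omega,
      if_pos (⟨by omega, by push_cast; omega⟩ : 0 ≤ ((t + 1 : Nat) : Int) ∧ ((t + 1 : Nat) : Int) < (cols : Int))]
    simp only [Int.toNat_natCast]
    by_cases hc : (row.getD (t + 1) "" == "^") = true <;>
      simp [hc, ht1] <;> (try split_ifs) <;> omega
  · rw [h0 ht1, if_neg (by push_cast; omega), if_neg (fun hh => ht1 hh.1)]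

theorem pvStep_rel (row : List String) (cols : Nat) (d : PySem.Dict Int Int) (l : List Int)
    (h : pvRel cols d l) : pvRel cols (pvStepA row cols d) (pvStepB row cols l) := by
  obtain ⟨hlen, hnd, hb, hg⟩ := h
  have hout : ∀ k : Int, ¬ (0 ≤ k ∧ k < (cols : Int)) → d.getD k 0 = 0 := by
    intro k hk
    apply PySem.Dict.getD_of_not_contains
    rcases hc : d.contains k with _ | _
    · rfl
    · exact absurd (hb k ((PySem.Dict.contains_iff_mem_keys d k).mp hc)) hk
  have hkeys := pvStepA_keys row cols d
  refine ⟨by simp [pvStepB], hkeys.1, hkeys.2, ?_⟩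
  intro t ht
  have hsum := pvDictSumThree d hnd (t : Int) (fun c w => pvContrib row cols c w (t : Int))
    (fun c => pvContrib_zero row cols c t)
    (fun c w h1 h2 h3 => pvContrib_support row cols c w t h1 h2 h3)
  simp only at hsum
  rw [pvStepA_getD, hsum]
  unfold pvStepB
  rw [PySem.List.getD_map_range _ cols t 0 ht]
  rw [pvE1 row cols t ht _ (l.getD (t - 1) 0)
        (fun h => hout _ (by omega))
        (fun h => by rw [show ((t : Int) - 1) = ((t - 1 : Nat) : Int) by omega]; exact hg (t - 1) (by omega)),
      pvE2 row cols t ht _,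
      pvE3 row cols t ht _ (l.getD (t + 1) 0)
        (fun h => hout _ (by push_cast; omega))
        (fun h => by rw [show ((t : Int) + 1) = ((t + 1 : Nat) : Int) by omega]; exact hg (t + 1) h)]
  rw [hg t ht]
  ring

theorem pvFold_rel (rows : List (List String)) (cols : Nat) (d : PySem.Dict Int Int)
    (l : List Int) (h : pvRel cols d l) :
    pvRel cols (rows.foldl (fun w row => pvStepA row cols w) d)
      (rows.foldl (fun cnt row => pvStepB row cols cnt) l) := by
  induction rows generalizing d l with
  | nil => exact h
  | cons r rs ih => exact ih _ _ (pvStep_rel r cols d l h)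

theorem pvInit_rel (cols sc : Nat) (hsc : sc < cols) :
    pvRel cols (PySem.Dict.empty.insert (sc : Int) 1)
      ((List.replicate cols (0 : Int)).set sc 1) := by
  refine ⟨by simp, ?_, ?_, ?_⟩
  · rw [PySem.Dict.keys_insert_of_not_contains (h := by simp)]
    simp
  · intro k hk
    rw [PySem.Dict.keys_insert_of_not_contains (h := by simp)] at hk
    simp at hk
    omega
  · intro c hc
    rw [PySem.Dict.getD_insert, List.getD_eq_getElem?_getD, List.getElem?_set]
    by_cases h : c = sc
    · subst h; simp [hsc]
    · rw [if_neg (by exact_mod_cast h), if_neg (fun hh => h hh.symm)]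
      simp [hc]

theorem pvFindS_col_lt (grid : List (List String)) (cols r0 sr sc : Nat)
    (h : pvFindS grid cols r0 = some (sr, sc)) : sc < cols := by
  induction grid generalizing r0 with
  | nil => simp [pvFindS] at h
  | cons row rest ih =>
    unfold pvFindS at h
    cases hf : (List.range cols).find? (fun c => row.getD c "" == "S") with
    | some c =>
      rw [hf] at h
      cases h
      exact List.mem_range.mp (List.mem_of_find?_eq_some hf)
    | none =>
      rw [hf] at h
      exact ih _ h

-- ===== VERDICT (by name: the statement is the Claim_ definition above) =====
theorem count_timeline_spec : Claim_equal_count_timeline := by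
  intro grid _ _
  unfold Spec_count_timeline count_timeline count_timeline_alt
  simp only [List.headD_eq_head?_getD]
  cases h : pvFindS grid (grid.head?.getD []).length 0 with
  | none => rfl
  | some sv =>
    exact pvValuesSum _ _ _
      (pvFold_rel _ _ _ _ (pvInit_rel _ sv.2 (pvFindS_col_lt grid _ 0 sv.1 sv.2 (by rw [h]))))
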